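-- pv_equiv track=rewrite | github.com/bstanton773/kekambas-117_week3_day2 | whiteboard.py | solution
-- ===== SOURCE A (Python) =====
-- def solution(nums):
--     seen_once = set()
--     for num in nums:
--         if num in seen_once:
--             return num
--         else:
--             seen_once.add(num)
--     return -1
-- ===== SOURCE B (Python) =====
-- def solution(nums):
--     # Two staged passes: (1) build a first-occurrence index map,
--     # (2) reverse scan keeping the repeated element with the smallest index.
--     first_pos = {}
--     for i, x in enumerate(nums):
--         first_pos.setdefault(x, i)
--     ans = -1
--     for i, x in reversed(list(enumerate(nums))):
--         if first_pos[x] < i: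
--             ans = x
--     return ans
-- ===== Notes on version B (the rewrite author's own statement) =====
-- stated objective: alternative
-- what changed: B replaces A's single forward pass with a seen-set and early return by two staged passes: it first builds a map from each value to its first-occurrence index, then scans the enumerated list in reverse, keeping the repeated element with the smallest index.
import Mathlib
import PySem

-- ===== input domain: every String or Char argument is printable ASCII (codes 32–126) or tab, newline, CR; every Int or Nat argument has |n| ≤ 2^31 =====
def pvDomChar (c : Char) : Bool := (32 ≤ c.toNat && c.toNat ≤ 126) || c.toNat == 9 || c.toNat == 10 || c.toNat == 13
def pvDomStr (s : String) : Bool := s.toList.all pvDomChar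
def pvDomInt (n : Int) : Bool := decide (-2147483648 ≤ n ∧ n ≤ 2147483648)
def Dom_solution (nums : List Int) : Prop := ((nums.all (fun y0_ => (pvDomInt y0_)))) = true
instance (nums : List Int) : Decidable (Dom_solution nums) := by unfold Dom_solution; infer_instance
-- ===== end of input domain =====

-- B replaces A's single seen-set pass with two staged passes: a first-occurrence index map, then a reverse scan keeping the repeated element of smallest index (alternative decomposition, same return value).

-- ===== PORT A =====
def solutionLoop (seen : PySem.Set Int) : List Int → Int
  | [] => -1
  | n :: rest => if n ∈ seen then n else solutionLoop (PySem.Set.add seen n) rest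

def solution (nums : List Int) : Int := solutionLoop PySem.Set.empty nums

-- ===== PORT B =====
-- pass 1: first_pos.setdefault(x, i) over enumerate(nums)
def altFirstPos (nums : List Int) : PySem.Dict Int Int :=
  (PySem.List.enumerate nums).foldl (fun d p => d.setdefault p.2 p.1) PySem.Dict.empty

-- pass 2: reverse scan; the `none` arm is Python's KeyError, unreachable since pass 1 inserted every element
def solution_alt (nums : List Int) : Int :=
  let fp := altFirstPos nums
  ((PySem.List.enumerate nums).reverse).foldl
    (fun ans p => match fp.get? p.2 with
      | some j => if j < p.1 then p.2 else ans
      | none => ans)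
    (-1)

-- ===== PRECONDITION & SPEC =====
def Spec_solution (nums : List Int) (out : Int) : Prop := out = solution_alt nums
instance (nums : List Int) (out : Int) : Decidable (Spec_solution nums out) := by unfold Spec_solution; infer_instance

-- ===== CLAIM (what is proved, stated in full; the proofs are below) =====
def Claim_equal_solution : Prop := ∀ (nums : List Int), Dom_solution nums → Spec_solution nums (solution nums)

-- ===== LEMMAS AND PROOFS =====

-- the common reference form: the second component of the first enumerated pair whose value already occurs earlier
def findForm (nums : List Int) : Int :=
  match (PySem.List.enumerate nums).find? (fun p => decide ((nums.idxOf p.2 : Int) < p.1)) with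
  | some p => p.2
  | none => -1

lemma get?_setdefault (d : PySem.Dict Int Int) (k : Int) (v : Int) (x : Int) :
    (d.setdefault k v).get? x =
      match d.get? x with
      | some w => some w
      | none => if x = k then some v else none := by
  by_cases hc : d.contains k
  · rw [PySem.Dict.setdefault_of_contains d v hc]
    cases hx : d.get? x with
    | some w => simp
    | none =>
      simp only
      by_cases hxk : x = k
      · subst hxk
        rw [PySem.Dict.contains_eq_isSome_get?, hx] at hc
        simp at hc
      · simp [hxk]
  · rw [PySem.Dict.setdefault_of_not_contains d v (by simpa using hc)]
    by_cases hxk : x = k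
    · subst hxk
      rw [PySem.Dict.get?_insert_self]
      have : d.get? x = none := by
        rw [PySem.Dict.contains_eq_isSome_get?] at hc
        cases h : d.get? x <;> simp [h] at hc ⊢
      simp [this]
    · rw [PySem.Dict.get?_insert_of_ne d v hxk]
      cases d.get? x <;> simp [hxk]

lemma get?_firstFold : ∀ (l : List Int) (s : Int) (d : PySem.Dict Int Int) (x : Int),
    ((PySem.List.enumerate l s).foldl (fun d p => d.setdefault p.2 p.1) d).get? x =
      match d.get? x with
      | some w => some w
      | none => if x ∈ l then some (s + (l.idxOf x : Int)) else none := by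
  intro l
  induction l with
  | nil =>
    intro s d x
    simp [PySem.List.enumerate_nil]
    cases d.get? x <;> simp
  | cons a t ih =>
    intro s d x
    rw [PySem.List.enumerate_cons, List.foldl_cons, ih]
    rw [get?_setdefault]
    cases hx : d.get? x with
    | some w => simp
    | none =>
      by_cases hxa : x = a
      · subst hxa
        simp [List.idxOf_cons_self]
      · by_cases hm : x ∈ t
        · rw [List.idxOf_cons_ne _ (Ne.symm hxa)]
          have hcast : (((t.idxOf x).succ : Nat) : Int) = (t.idxOf x : Int) + 1 := by
            push_cast
            ring
          simp [hxa, hm, hcast]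
          ring
        · simp [hxa, hm]

lemma get?_altFirstPos (nums : List Int) (x : Int) (hx : x ∈ nums) :
    (altFirstPos nums).get? x = some ((nums.idxOf x : Int)) := by
  unfold altFirstPos
  rw [get?_firstFold]
  simp [PySem.Dict.get?_empty, hx]

lemma foldl_rev_keepFirst (cond : Int × Int → Bool) :
    ∀ (l : List (Int × Int)) (a : Int),
      l.reverse.foldl (fun ans p => if cond p then p.2 else ans) a =
        match l.find? cond with
        | some p => p.2
        | none => a := by
  intro l
  induction l with
  | nil => intro a; simp
  | cons p t ih =>
    intro a
    rw [List.reverse_cons, List.foldl_append, List.find?_cons]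
    cases hc : cond p with
    | true => simp [ih, hc]
    | false => simp [ih, hc]

lemma B_eq_findForm (nums : List Int) : solution_alt nums = findForm nums := by
  unfold solution_alt findForm
  have hcongr :
      ((PySem.List.enumerate nums).reverse).foldl
        (fun ans p => match (altFirstPos nums).get? p.2 with
          | some j => if j < p.1 then p.2 else ans
          | none => ans) (-1) =
      ((PySem.List.enumerate nums).reverse).foldl
        (fun ans p => if decide ((nums.idxOf p.2 : Int) < p.1) then p.2 else ans) (-1) := by
    apply PySem.List.foldl_congr_mem
    intro acc p hp
    have hmem : p.2 ∈ nums := by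
      have : p ∈ PySem.List.enumerate nums := List.mem_reverse.mp hp
      have := congrArg (p.2 ∈ ·) (PySem.List.map_snd_enumerate nums 0)
      simp only at this
      rw [← this]
      exact List.mem_map_of_mem ‹p ∈ PySem.List.enumerate nums›
    rw [get?_altFirstPos nums p.2 hmem]
    simp
  simp only at hcongr
  rw [hcongr, foldl_rev_keepFirst]

lemma A_eq_findForm_gen (nums : List Int) :
    ∀ (l pre : List Int) (seen : PySem.Set Int),
      nums = pre ++ l → (∀ x, x ∈ seen ↔ x ∈ pre) →
      solutionLoop seen l =
        match (PySem.List.enumerate l (pre.length : Int)).find?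
              (fun p => decide ((nums.idxOf p.2 : Int) < p.1)) with
        | some p => p.2
        | none => -1 := by
  intro l
  induction l with
  | nil =>
    intro pre seen _ _
    simp [solutionLoop, PySem.List.enumerate_nil]
  | cons n rest ih =>
    intro pre seen hnums hseen
    rw [PySem.List.enumerate_cons]
    have hidx : ((nums.idxOf n : Int) < (pre.length : Int)) ↔ n ∈ pre := by
      constructor
      · intro h
        by_contra hmem
        rw [hnums, List.idxOf_append_of_notMem hmem] at h
        simp [List.idxOf_cons_self] at h
      · intro hmem
        rw [hnums, List.idxOf_append_of_mem hmem]
        exact_mod_cast List.idxOf_lt_length_of_mem hmem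
    rw [List.find?_cons]
    by_cases hmem : n ∈ pre
    · have hcb : decide ((nums.idxOf n : Int) < (pre.length : Int)) = true := by
        simp [hidx, hmem]
      simp only [hcb]
      rw [solutionLoop, if_pos ((hseen n).mpr hmem)]
    · have hcb : decide ((nums.idxOf n : Int) < (pre.length : Int)) = false := by
        simp [hidx, hmem]
      simp only [hcb]
      rw [solutionLoop, if_neg (fun h => hmem ((hseen n).mp h))]
      have hpre' : nums = (pre ++ [n]) ++ rest := by simp [hnums]
      have hlen : ((pre ++ [n]).length : Int) = (pre.length : Int) + 1 := by
        simp
      have := ih (pre ++ [n]) (PySem.Set.add seen n) hpre' (by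
        intro x
        rw [PySem.Set.mem_add]
        simp [hseen x])
      rw [this, hlen]

lemma A_eq_findForm (nums : List Int) : solution nums = findForm nums := by
  unfold solution findForm
  have := A_eq_findForm_gen nums nums [] PySem.Set.empty (by simp) (by simp [PySem.Set.empty])
  simpa using this

-- ===== VERDICT (by name: the statement is the Claim_ definition above) =====
theorem solution_spec : Claim_equal_solution := by
  intro nums _
  unfold Spec_solution
  rw [A_eq_findForm, B_eq_findForm]
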